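-- pv_equiv track=rewrite | github.com/GanizaniSitara/concepts | graph_layout.py | pack_rows
-- ===== SOURCE A (Python) =====
-- MAX_PER_ROW = 10
--
-- def pack_rows(cluster_anchor_qr, nodes_in_cluster):
--     q0, r0 = cluster_anchor_qr
--     packed_coords = {}
--     for idx, node_id in enumerate(nodes_in_cluster):
--         # Logical row and column for filling the cluster
--         row_idx = idx // MAX_PER_ROW
--         col_idx = idx % MAX_PER_ROW
--
--         # Axial coordinates for a standard flat-topped honeycomb packing
--         # Changed from 'col_idx + (row_idx - (row_idx & 1)) // 2' to 'col_idx - (row_idx // 2)'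
--         # to achieve a consistent leftward slant for clusters as row_idx increases.
--         q_local = col_idx - (row_idx // 2)
--         r_local = row_idx
--
--         current_q = q0 + q_local
--         current_r = r0 + r_local
--         packed_coords[node_id] = (current_q, current_r)
--     return packed_coords
-- ===== SOURCE B (Python) =====
-- MAX_PER_ROW = 10
--
-- def pack_rows(cluster_anchor_qr, nodes_in_cluster):
--     # Explicit row-by-row traversal: walk the list in slices of MAX_PER_ROW,
--     # placing each row from its own start coordinate.
--     q0, r0 = cluster_anchor_qr
--     packed_coords = {}
--     nodes = list(nodes_in_cluster)
--     n = len(nodes)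
--     start = 0
--     row_idx = 0
--     while start < n:
--         row = nodes[start:start + MAX_PER_ROW]
--         q_start = q0 - row_idx // 2
--         r = r0 + row_idx
--         for col_idx, node_id in enumerate(row):
--             packed_coords[node_id] = (q_start + col_idx, r)
--         start += MAX_PER_ROW
--         row_idx += 1
--     return packed_coords
-- ===== Notes on version B (the rewrite author's own statement) =====
-- stated objective: alternative
-- what changed: Replaces the single flat enumerate loop with div/mod index arithmetic by an explicit nested traversal: the list is sliced into rows of MAX_PER_ROW, each row gets its start coordinate once, and the inner loop only adds the column offset.
import Mathlib
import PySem

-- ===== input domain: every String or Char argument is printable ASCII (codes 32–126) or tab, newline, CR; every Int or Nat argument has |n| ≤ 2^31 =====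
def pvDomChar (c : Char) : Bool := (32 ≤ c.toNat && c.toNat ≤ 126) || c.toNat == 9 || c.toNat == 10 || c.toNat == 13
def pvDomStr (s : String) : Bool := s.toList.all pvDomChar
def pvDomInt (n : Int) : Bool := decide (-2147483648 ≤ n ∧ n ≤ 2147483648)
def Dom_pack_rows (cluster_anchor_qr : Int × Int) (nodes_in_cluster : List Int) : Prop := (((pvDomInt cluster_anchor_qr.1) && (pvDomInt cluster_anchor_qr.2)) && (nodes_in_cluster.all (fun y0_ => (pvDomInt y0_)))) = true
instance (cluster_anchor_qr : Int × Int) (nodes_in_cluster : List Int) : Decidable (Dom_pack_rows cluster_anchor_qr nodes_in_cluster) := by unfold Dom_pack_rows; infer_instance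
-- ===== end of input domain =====

-- B replaces A's flat enumerate loop with div/mod index arithmetic by an explicit
-- nested row-by-row traversal (rows of 10, per-row start coordinate); same cost,
-- alternative decomposition.

-- ===== PORT A =====
def pack_rows (cluster_anchor_qr : Int × Int) (nodes_in_cluster : List Int) : List (Int × Int × Int) :=
  let q0 := cluster_anchor_qr.1
  let r0 := cluster_anchor_qr.2
  ((PySem.List.enumerate nodes_in_cluster 0).foldl
    (fun d p =>
      let row_idx := PySem.Int.floordiv p.1 10
      let col_idx := PySem.Int.mod p.1 10
      let q_local := col_idx - PySem.Int.floordiv row_idx 2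
      let r_local := row_idx
      d.insert p.2 (q0 + q_local, r0 + r_local))
    (PySem.Dict.empty : PySem.Dict Int (Int × Int))).items

-- ===== PORT B =====
-- inner `for col_idx, node_id in enumerate(row)` loop of Source B
def packRowB (q_start r : Int) (row : List Int) (d : PySem.Dict Int (Int × Int)) :
    PySem.Dict Int (Int × Int) :=
  (PySem.List.enumerate row 0).foldl (fun d p => d.insert p.2 (q_start + p.1, r)) d

-- outer `while start < n:` loop of Source B: slice off one row of 10, place it, advance
def packLoopB (q0 r0 : Int) (nodes : List Int) (start row_idx : Nat)
    (d : PySem.Dict Int (Int × Int)) : PySem.Dict Int (Int × Int) :=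
  if start < nodes.length then
    packLoopB q0 r0 nodes (start + 10) (row_idx + 1)
      (packRowB (q0 - PySem.Int.floordiv (row_idx : Int) 2) (r0 + (row_idx : Int))
        (PySem.List.slice nodes (some (start : Int)) (some ((start : Int) + 10))) d)
  else d
termination_by nodes.length - start
decreasing_by omega

def pack_rows_alt (cluster_anchor_qr : Int × Int) (nodes_in_cluster : List Int) : List (Int × Int × Int) :=
  (packLoopB cluster_anchor_qr.1 cluster_anchor_qr.2 nodes_in_cluster 0 0
    (PySem.Dict.empty : PySem.Dict Int (Int × Int))).items

-- ===== PRECONDITION & SPEC =====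
def Spec_pack_rows (cluster_anchor_qr : Int × Int) (nodes_in_cluster : List Int) (out : List (Int × Int × Int)) : Prop := out = pack_rows_alt cluster_anchor_qr nodes_in_cluster
instance (cluster_anchor_qr : Int × Int) (nodes_in_cluster : List Int) (out : List (Int × Int × Int)) : Decidable (Spec_pack_rows cluster_anchor_qr nodes_in_cluster out) := by unfold Spec_pack_rows; infer_instance

-- ===== CLAIM (what is proved, stated in full; the proofs are below) =====
def Claim_equal_pack_rows : Prop := ∀ (cluster_anchor_qr : Int × Int) (nodes_in_cluster : List Int), Dom_pack_rows cluster_anchor_qr nodes_in_cluster → Spec_pack_rows cluster_anchor_qr nodes_in_cluster (pack_rows cluster_anchor_qr nodes_in_cluster)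

-- ===== LEMMAS AND PROOFS =====

-- A's loop body, named for the proofs
def fA (q0 r0 : Int) (d : PySem.Dict Int (Int × Int)) (p : Int × Int) : PySem.Dict Int (Int × Int) :=
  let row_idx := PySem.Int.floordiv p.1 10
  let col_idx := PySem.Int.mod p.1 10
  let q_local := col_idx - PySem.Int.floordiv row_idx 2
  let r_local := row_idx
  d.insert p.2 (q0 + q_local, r0 + r_local)

theorem pack_rows_eq (a : Int × Int) (ns : List Int) :
    pack_rows a ns = ((PySem.List.enumerate ns 0).foldl (fA a.1 a.2)
      (PySem.Dict.empty : PySem.Dict Int (Int × Int))).items := rfl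

-- one row: A's indices 10*s+k (k the column) compute exactly B's per-row placement
theorem inner_row (q0 r0 : Int) (s : Nat) :
    ∀ (row : List Int) (k : Nat), row.length + k ≤ 10 →
    ∀ d, (PySem.List.enumerate row (10 * (s : Int) + (k : Int))).foldl (fA q0 r0) d
      = (PySem.List.enumerate row (k : Int)).foldl
          (fun d p => d.insert p.2 ((q0 - PySem.Int.floordiv (s : Int) 2) + p.1, r0 + (s : Int))) d := by
  intro row
  induction row with
  | nil => intro k hk d; simp [PySem.List.enumerate_nil]
  | cons x xs ih =>
    intro k hk d
    rw [PySem.List.enumerate_cons, PySem.List.enumerate_cons]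
    simp only [List.foldl_cons]
    have hk9 : k ≤ 9 := by simp at hk; omega
    have h1 : PySem.Int.floordiv (10 * (s : Int) + (k : Int)) 10 = (s : Int) := by
      rw [PySem.Int.floordiv_eq_ediv_of_pos (by norm_num)]; omega
    have h2 : PySem.Int.mod (10 * (s : Int) + (k : Int)) 10 = (k : Int) := by
      rw [PySem.Int.mod_eq_emod_of_pos (by norm_num)]; omega
    have hbody : fA q0 r0 d (10 * (s : Int) + (k : Int), x)
        = d.insert x ((q0 - PySem.Int.floordiv (s : Int) 2) + (k : Int), r0 + (s : Int)) := by
      simp only [fA, h1, h2]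
      congr 2
      ring
    rw [hbody]
    have hcast : 10 * (s : Int) + (k : Int) + 1 = 10 * (s : Int) + ((k + 1 : Nat) : Int) := by
      push_cast; ring
    have hcast2 : (k : Int) + 1 = ((k + 1 : Nat) : Int) := by push_cast; ring
    rw [hcast, hcast2, ih (k + 1) (by simp at hk ⊢; omega)]

-- whole loop: A's fold over the suffix from index 10*s equals B's while loop at start = 10*s
theorem outer_loop (q0 r0 : Int) (L : List Int) :
    ∀ (n : Nat) (s : Nat), L.length - 10 * s ≤ n → ∀ d,
    (PySem.List.enumerate (L.drop (10 * s)) (10 * (s : Int))).foldl (fA q0 r0) d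
      = packLoopB q0 r0 L (10 * s) s d := by
  intro n
  induction n with
  | zero =>
    intro s h d
    have hge : L.length ≤ 10 * s := by omega
    rw [List.drop_eq_nil_of_le hge]
    rw [packLoopB.eq_def]
    simp [PySem.List.enumerate_nil, Nat.not_lt.mpr hge]
  | succ m ih =>
    intro s h d
    by_cases hlt : 10 * s < L.length
    · have hsplit : L.drop (10 * s) = (L.drop (10 * s)).take 10 ++ (L.drop (10 * s)).drop 10 := by
        simp
      conv_lhs => rw [hsplit]
      rw [PySem.List.enumerate_append, List.foldl_append]
      have hz : (10 * (s : Int)) = 10 * (s : Int) + ((0 : Nat) : Int) := by simp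
      have htake : ((L.drop (10 * s)).take 10).length + 0 ≤ 10 := by
        rw [List.length_take]; omega
      rw [hz, inner_row q0 r0 s _ 0 htake d]
      rw [packLoopB.eq_def]
      simp only [if_pos hlt]
      have hslice : PySem.List.slice L (some ((10 * s : Nat) : Int)) (some (((10 * s : Nat) : Int) + 10))
          = (L.drop (10 * s)).take 10 := by
        have := PySem.List.slice_natCast_add L (10 * s) 10
        simpa using this
      have hrow : (PySem.List.enumerate ((L.drop (10 * s)).take 10) ((0 : Nat) : Int)).foldl
            (fun d p => d.insert p.2 ((q0 - PySem.Int.floordiv (s : Int) 2) + p.1, r0 + (s : Int))) d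
          = packRowB (q0 - PySem.Int.floordiv (s : Int) 2) (r0 + (s : Int))
              (PySem.List.slice L (some ((10 * s : Nat) : Int)) (some (((10 * s : Nat) : Int) + 10))) d := by
        rw [hslice]; simp [packRowB]
      rw [hrow]
      set d' := packRowB (q0 - PySem.Int.floordiv (s : Int) 2) (r0 + (s : Int))
        (PySem.List.slice L (some ((10 * s : Nat) : Int)) (some (((10 * s : Nat) : Int) + 10))) d
      have hdd : (L.drop (10 * s)).drop 10 = L.drop (10 * (s + 1)) := by
        rw [List.drop_drop]
        congr 1
      by_cases hend : L.length ≤ 10 * s + 10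
      · have hnil : (L.drop (10 * s)).drop 10 = [] := by
          rw [hdd]; apply List.drop_eq_nil_of_le; omega
        rw [hnil]
        rw [packLoopB.eq_def]
        simp [PySem.List.enumerate_nil, Nat.not_lt.mpr (by omega : L.length ≤ 10 * s + 10)]
      · have hlen10 : ((L.drop (10 * s)).take 10).length = 10 := by
          rw [List.length_take, List.length_drop]; omega
        rw [hlen10, hdd]
        have hstart : 10 * (s : Int) + ((0 : Nat) : Int) + ((10 : Nat) : Int) = 10 * ((s + 1 : Nat) : Int) := by
          push_cast; ring
        have harg : 10 * s + 10 = 10 * (s + 1) := by omega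
        rw [hstart, harg, ih (s + 1) (by omega) d']
    · have hge : L.length ≤ 10 * s := by omega
      rw [List.drop_eq_nil_of_le hge]
      rw [packLoopB.eq_def]
      simp [PySem.List.enumerate_nil, Nat.not_lt.mpr hge]

-- ===== VERDICT (by name: the statement is the Claim_ definition above) =====
theorem pack_rows_spec : Claim_equal_pack_rows := by
  intro a ns _
  unfold Spec_pack_rows pack_rows_alt
  rw [pack_rows_eq]
  have h := outer_loop a.1 a.2 ns ns.length 0 (by omega)
    (PySem.Dict.empty : PySem.Dict Int (Int × Int))
  simp only [Nat.mul_zero, Nat.cast_zero, Int.mul_zero, List.drop_zero] at h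
  exact congrArg PySem.Dict.items h
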